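-- pv_equiv track=rewrite | github.com/rekhadhorigol/kmap | backend/server.py | sop_to_verilog
-- ===== SOURCE A (Python) =====
-- def sop_to_verilog(expression, num_vars, var_names):
--     if expression == "0":
--         return "1'b0"
--     if expression == "1":
--         return "1'b1"
--     vars_list = var_names[:num_vars]
--     sorted_vars = sorted(vars_list, key=len, reverse=True)
--     terms = expression.split(" + ")
--     verilog_terms = []
--     for term in terms:
--         literals = []
--         i = 0
--         while i < len(term):
--             matched = False
--             for var in sorted_vars:
--                 if term[i:i+len(var)] == var:
--                     next_i = i + len(var)
--                     complement = next_i < len(term) and term[next_i] == "'"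
--                     if complement:
--                         next_i += 1
--                     literals.append(f"~{var}" if complement else var)
--                     i = next_i
--                     matched = True
--                     break
--             if not matched:
--                 i += 1
--         if not literals:
--             verilog_terms.append("1'b1")
--         elif len(literals) == 1:
--             verilog_terms.append(literals[0])
--         else:
--             verilog_terms.append(f"({' & '.join(literals)})")
--     return " | ".join(verilog_terms)
-- ===== SOURCE B (Python) =====
-- def sop_to_verilog(expression, num_vars, var_names):
--     if expression == "0":
--         return "1'b0"
--     if expression == "1":
--         return "1'b1"
--     vars_list = var_names[:num_vars]
--
--     def translate(term):
--         n = len(term)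
--         # enumerate every occurrence of every variable, then resolve
--         # overlaps by a single left-to-right sweep of the sorted matches
--         cands = []
--         for v in vars_list:
--             for pos in range(n - len(v) + 1):
--                 if term.startswith(v, pos):
--                     cands.append((pos, v))
--         cands.sort(key=lambda c: (c[0], -len(c[1])))
--         lits = []
--         i = 0
--         for start, v in cands:
--             if start < i:
--                 continue
--             j = start + len(v)
--             if j < n and term[j] == "'":
--                 lits.append("~" + v)
--                 i = j + 1
--             else:
--                 lits.append(v)
--                 i = j
--         if not lits:
--             return "1'b1"
--         if len(lits) == 1:
--             return lits[0]
--         return "(" + " & ".join(lits) + ")"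
--
--     return " | ".join(translate(t) for t in expression.split(" + "))
-- ===== Notes on version B (the rewrite author's own statement) =====
-- stated objective: alternative
-- what changed: Instead of A's per-position greedy scan that tries each sorted variable at every index, B first enumerates every occurrence of every variable in the term, sorts the occurrence list by (start, -length), and resolves overlaps with a single left-to-right sweep over that sorted match list.
-- outside the precondition, e.g. on sop_to_verilog("'", 1, ['']): A returns '~', B returns '(~ & )'
import Mathlib
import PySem

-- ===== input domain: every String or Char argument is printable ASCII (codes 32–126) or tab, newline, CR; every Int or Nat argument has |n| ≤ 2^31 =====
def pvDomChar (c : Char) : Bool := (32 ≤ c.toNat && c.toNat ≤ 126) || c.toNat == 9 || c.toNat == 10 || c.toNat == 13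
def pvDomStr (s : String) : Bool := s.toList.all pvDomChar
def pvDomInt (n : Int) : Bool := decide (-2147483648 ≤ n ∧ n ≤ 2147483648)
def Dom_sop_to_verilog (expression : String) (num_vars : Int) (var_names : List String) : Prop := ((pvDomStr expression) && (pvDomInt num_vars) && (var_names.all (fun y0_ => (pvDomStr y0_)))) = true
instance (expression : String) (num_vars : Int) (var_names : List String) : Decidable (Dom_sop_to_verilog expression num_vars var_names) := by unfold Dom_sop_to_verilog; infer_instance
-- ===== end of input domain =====

-- B replaces A's per-position greedy scan by 'enumerate all variable occurrences, sort them by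
-- (start, -length), sweep once left to right': objective 'alternative'; return value only.

-- ===== PORT A =====
-- inner while loop of A: fuel = remaining chars bound; find? = 'for var in sorted_vars: … break'
def pvAScan (svars : List String) (t : List Char) (fuel : Nat) (i : Nat) (lits : List String) : List String :=
  match fuel with
  | 0 => lits.reverse
  | f + 1 =>
    if i < t.length then
      -- term[i:i+len(var)] == var  (slice with Nat bounds = drop/take)
      match svars.find? (fun v => (t.drop i).take v.toList.length == v.toList) with
      | some v =>
        let ni := i + v.toList.length
        if decide (ni < t.length) && (t.getD ni ' ' == '\'') then
          pvAScan svars t f (ni + 1) (("~" ++ v) :: lits)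
        else
          pvAScan svars t f ni (v :: lits)
      | none => pvAScan svars t f (i + 1) lits
    else lits.reverse

def pvAJoin (lits : List String) : String :=
  if lits == [] then "1'b1"
  else if lits.length == 1 then lits.headD ""
  else "(" ++ PySem.Str.join " & " lits ++ ")"

def sop_to_verilog (expression : String) (num_vars : Int) (var_names : List String) : String :=
  if expression == "0" then "1'b0"
  else if expression == "1" then "1'b1"
  else
    -- vars_list = var_names[:num_vars]; sorted_vars = sorted(vars_list, key=len, reverse=True);
    -- split? is always some since the separator " + " is a non-empty literal
    PySem.Str.join " | "
      (((PySem.Str.split? expression " + ").getD []).foldl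
        (fun acc term => acc ++ [pvAJoin (pvAScan
          (PySem.List.sorted (PySem.List.slice var_names none (some num_vars))
            (fun v => v.toList.length) true)
          term.toList term.toList.length 0 [])]) [])

-- ===== PORT B =====
-- the two nested 'for v … for pos in range(n - len(v) + 1): if term.startswith(v, pos)' loops;
-- term.startswith(v, pos) with 0 ≤ pos is exactly 'v.toList prefix of (term.toList.drop pos)'
def pvCands (vars : List String) (t : List Char) : List (Int × String) :=
  vars.foldl (fun acc v =>
    (PySem.List.pyRange 0 ((t.length : Int) - v.toList.length + 1) 1).foldl
      (fun acc2 p => if v.toList.isPrefixOf (t.drop p.toNat) then acc2 ++ [(p, v)] else acc2)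
      acc) []

-- the 'for start, v in cands: …' sweep with the running pointer i ('continue' = first branch)
def pvSweep (t : List Char) (cs : List (Int × String)) (i : Int) : List String :=
  match cs with
  | [] => []
  | (s, v) :: rest =>
    if s < i then pvSweep t rest i
    else
      let j := s + v.toList.length
      if decide (j < (t.length : Int)) && (t.getD j.toNat ' ' == '\'') then
        ("~" ++ v) :: pvSweep t rest (j + 1)
      else
        v :: pvSweep t rest j

def pvRender (lits : List String) : String :=
  match lits with
  | [] => "1'b1"
  | [l] => l
  | _ => "(" ++ PySem.Str.join " & " lits ++ ")"

def pvTranslate (vars : List String) (term : String) : String :=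
  pvRender (pvSweep term.toList
    (PySem.List.sorted2 (pvCands vars term.toList)
      (fun c => c.1) (fun c => -(c.2.toList.length : Int)) false) 0)

def sop_to_verilog_alt (expression : String) (num_vars : Int) (var_names : List String) : String :=
  if expression == "0" then "1'b0"
  else if expression == "1" then "1'b1"
  else
    -- vars_list = var_names[:num_vars]; cands.sort(key=lambda c: (c[0], -len(c[1]))) = sorted2;
    -- split? is always some (non-empty separator)
    PySem.Str.join " | " (((PySem.Str.split? expression " + ").getD []).map
      (pvTranslate (PySem.List.slice var_names none (some num_vars))))

-- ===== PRECONDITION & SPEC =====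
-- Pre_ excludes an empty string among the used variable names var_names[:num_vars]: on such
-- inputs A's zero-width matches make it loop forever on most terms, and where it does return
-- its output is an accident of the zero-width match; B always returns.
def Pre_sop_to_verilog (expression : String) (num_vars : Int) (var_names : List String) : Prop :=
  "" ∉ PySem.List.slice var_names none (some num_vars)
instance (expression : String) (num_vars : Int) (var_names : List String) : Decidable (Pre_sop_to_verilog expression num_vars var_names) := by unfold Pre_sop_to_verilog; infer_instance
def pvWitness_sop_to_verilog : String × Int × List String := ("AB' + A", 2, ["A", "B"])
def Spec_sop_to_verilog (expression : String) (num_vars : Int) (var_names : List String) (out : String) : Prop := out = sop_to_verilog_alt expression num_vars var_names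
instance (expression : String) (num_vars : Int) (var_names : List String) (out : String) : Decidable (Spec_sop_to_verilog expression num_vars var_names out) := by unfold Spec_sop_to_verilog; infer_instance

-- ===== CLAIM (what is proved, stated in full; the proofs are below) =====
def Claim_equal_sop_to_verilog : Prop := ∀ (expression : String) (num_vars : Int) (var_names : List String), Dom_sop_to_verilog expression num_vars var_names → Pre_sop_to_verilog expression num_vars var_names → Spec_sop_to_verilog expression num_vars var_names (sop_to_verilog expression num_vars var_names)

-- ===== LEMMAS AND PROOFS =====

-- lex strict-order used by B's sort: key (start, -len)
def pvLt (c d : Int × String) : Bool :=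
  decide (c.1 < d.1) || (!decide (d.1 < c.1) && decide (-(c.2.toList.length : Int) < -(d.2.toList.length : Int)))

-- '(s, v) is an occurrence of a variable at a valid position'
def pvMatch (vars : List String) (t : List Char) (c : Int × String) : Prop :=
  c.2 ∈ vars ∧ 0 ≤ c.1 ∧ c.2.toList.isPrefixOf (t.drop c.1.toNat)

theorem pv_bool_iff : ∀ (a b : Bool), a = b ↔ (a = true ↔ b = true) := by decide

-- the prefix test and A's slice-compare test agree
theorem pv_match_eq (t : List Char) (i : Nat) (v : String) :
    (v.toList.isPrefixOf (t.drop i)) = ((t.drop i).take v.toList.length == v.toList) := by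
  rw [pv_bool_iff]
  simp only [List.isPrefixOf_iff_prefix, beq_iff_eq, List.prefix_iff_eq_take]
  exact comm

-- matches at the same position with the same length are the same string
theorem pv_match_unique (t : List Char) (i : Nat) (v w : String)
    (hv : ((t.drop i).take v.toList.length == v.toList) = true)
    (hw : ((t.drop i).take w.toList.length == w.toList) = true)
    (hlen : v.toList.length = w.toList.length) : v = w := by
  rw [beq_iff_eq] at hv hw
  have : v.toList = w.toList := by rw [← hv, ← hw, hlen]
  exact String.toList_inj.mp this

-- find? on a length-descending list returns a match of maximal length
theorem pv_find_max (t : List Char) (i : Nat) (s : List String)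
    (hp : s.Pairwise (fun a b => b.toList.length ≤ a.toList.length)) (v : String)
    (hf : s.find? (fun v => (t.drop i).take v.toList.length == v.toList) = some v) :
    ∀ w ∈ s, ((t.drop i).take w.toList.length == w.toList) = true →
      w.toList.length ≤ v.toList.length := by
  induction s with
  | nil => simp at hf
  | cons a s ih =>
    by_cases hpa : ((t.drop i).take a.toList.length == a.toList) = true
    · rw [List.find?_cons_of_pos (l := s) (p := fun v => ((t.drop i).take v.toList.length == v.toList)) hpa] at hf
      obtain rfl : a = v := by injection hf
      intro w hw hmw
      rcases List.mem_cons.mp hw with rfl | hw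
      · exact le_refl _
      · exact (List.pairwise_cons.mp hp).1 w hw
    · rw [List.find?_cons_of_neg (l := s) (p := fun v => ((t.drop i).take v.toList.length == v.toList)) (by simpa using hpa)] at hf
      intro w hw hmw
      rcases List.mem_cons.mp hw with rfl | hw
      · exact absurd hmw hpa
      · exact ih (List.pairwise_cons.mp hp).2 hf w hw hmw

-- pvLt facts (lex order on (start, -length))
theorem pvLt_asym (x y : Int × String) (h : pvLt x y = true) : pvLt y x = false := by
  simp only [pvLt, Bool.or_eq_true, Bool.and_eq_true, Bool.not_eq_true', decide_eq_true_eq,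
    decide_eq_false_iff_not, Bool.or_eq_false_iff, Bool.and_eq_false_iff, Bool.not_eq_false'] at *
  omega

theorem pvR_trans (x y z : Int × String) (h1 : pvLt x y = true) (h2 : pvLt z y = false) :
    pvLt z x = false := by
  simp only [pvLt, Bool.or_eq_true, Bool.and_eq_true, Bool.not_eq_true', decide_eq_true_eq,
    decide_eq_false_iff_not, Bool.or_eq_false_iff, Bool.and_eq_false_iff, Bool.not_eq_false'] at *
  omega

-- inserting into a ≼-sorted list keeps it sorted
theorem pv_insertBy_pairwise (x : Int × String) (ys : List (Int × String))
    (h : ys.Pairwise (fun a b => pvLt b a = false)) :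
    (PySem.List.insertBy pvLt x ys).Pairwise (fun a b => pvLt b a = false) := by
  induction ys with
  | nil => simp [PySem.List.insertBy]
  | cons y ys ih =>
    rw [List.pairwise_cons] at h
    by_cases hxy : pvLt x y = true
    · simp only [PySem.List.insertBy, hxy, if_true]
      refine List.pairwise_cons.mpr ⟨?_, List.pairwise_cons.mpr h⟩
      intro z hz
      rcases List.mem_cons.mp hz with rfl | hz
      · exact pvLt_asym x z hxy
      · exact pvR_trans x y z hxy (h.1 z hz)
    · simp only [PySem.List.insertBy, hxy]
      refine List.pairwise_cons.mpr ⟨?_, ih h.2⟩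
      intro z hz
      rcases (PySem.List.insertBy_mem_iff pvLt x z ys).mp hz with rfl | hz
      · exact Bool.eq_false_iff.mpr hxy
      · exact h.1 z hz

theorem pv_foldl_insertBy_pairwise :
    ∀ (xs acc : List (Int × String)), acc.Pairwise (fun a b => pvLt b a = false) →
      (xs.foldl (fun acc x => PySem.List.insertBy pvLt x acc) acc).Pairwise
        (fun a b => pvLt b a = false) := by
  intro xs
  induction xs with
  | nil => intro acc h; simpa using h
  | cons x xs ih => intro acc h; exact ih _ (pv_insertBy_pairwise x acc h)

-- B's sort is exactly foldl-insertBy with pvLt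
theorem pv_sorted2_eq (xs : List (Int × String)) :
    PySem.List.sorted2 xs (fun c => c.1) (fun c => -(c.2.toList.length : Int)) false
      = xs.foldl (fun acc x => PySem.List.insertBy pvLt x acc) [] := rfl

theorem pv_sorted2_pairwise (xs : List (Int × String)) :
    (PySem.List.sorted2 xs (fun c => c.1) (fun c => -(c.2.toList.length : Int)) false).Pairwise
      (fun a b => pvLt b a = false) := by
  rw [pv_sorted2_eq]
  exact pv_foldl_insertBy_pairwise xs [] (by simp)

-- a match occupies chars inside the term (variables are non-empty)
theorem pv_match_bounds (vars : List String) (t : List Char)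
    (hv : ∀ v ∈ vars, v.toList ≠ []) (s : Int) (v : String)
    (hm : pvMatch vars t (s, v)) : s + v.toList.length ≤ (t.length : Int) ∧ s < (t.length : Int) := by
  obtain ⟨hvv, hs, hpre⟩ := hm
  have hlen : v.toList.length ≤ (t.drop s.toNat).length :=
    (List.isPrefixOf_iff_prefix.mp hpre).length_le
  have hne : v.toList ≠ [] := hv v hvv
  have h1 : 1 ≤ v.toList.length := List.length_pos_iff.mpr hne
  simp only [List.length_drop] at hlen
  omega

-- membership in the candidate list = being a variable occurrence
theorem pv_mem_cands (vars : List String) (t : List Char)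
    (hv : ∀ v ∈ vars, v.toList ≠ []) (c : Int × String) :
    c ∈ pvCands vars t ↔ pvMatch vars t c := by
  unfold pvCands
  rw [show (fun (acc : List (Int × String)) (v : String) =>
        (PySem.List.pyRange 0 ((t.length : Int) - v.toList.length + 1) 1).foldl
          (fun acc2 p => if v.toList.isPrefixOf (t.drop p.toNat) then acc2 ++ [(p, v)] else acc2)
          acc)
      = (fun acc v => acc ++ ((PySem.List.pyRange 0 ((t.length : Int) - v.toList.length + 1) 1).filter
          (fun p => v.toList.isPrefixOf (t.drop p.toNat))).map (fun p => (p, v))) from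
      funext fun acc => funext fun v => PySem.List.foldl_append_if _ _ _ _]
  rw [PySem.List.foldl_append_eq_flatMap]
  simp only [List.nil_append, List.mem_flatMap, List.mem_map, List.mem_filter,
    PySem.List.mem_pyRange_one]
  constructor
  · rintro ⟨v, hvv, p, ⟨⟨hp0, _⟩, hpre⟩, rfl⟩
    exact ⟨hvv, hp0, by simpa using hpre⟩
  · intro hm
    obtain ⟨hvv, hs, hpre⟩ := hm
    have hb := pv_match_bounds vars t hv c.1 c.2 ⟨hvv, hs, hpre⟩
    exact ⟨c.2, hvv, c.1, ⟨⟨hs, by omega⟩, by simpa using hpre⟩, rfl⟩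

-- the sweep emits nothing once every occurrence is behind the pointer
theorem pv_sweep_nil (t : List Char) (cs : List (Int × String)) (i : Int)
    (h : ∀ c ∈ cs, c.1 < i) : pvSweep t cs i = [] := by
  induction cs with
  | nil => rfl
  | cons c rest ih =>
    obtain ⟨s, v⟩ := c
    have hs : s < i := h (s, v) List.mem_cons_self
    simp only [pvSweep, if_pos hs]
    exact ih (fun c hc => h c (List.mem_cons_of_mem _ hc))

-- no occurrence starts exactly at the pointer: moving it one forward changes nothing
theorem pv_sweep_succ (t : List Char) (cs : List (Int × String)) (i : Int)
    (h : ∀ c ∈ cs, c.1 ≠ i) : pvSweep t cs i = pvSweep t cs (i + 1) := by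
  induction cs with
  | nil => rfl
  | cons c rest ih =>
    obtain ⟨s, v⟩ := c
    have hne : s ≠ i := h (s, v) List.mem_cons_self
    by_cases hs : s < i
    · simp only [pvSweep, if_pos hs, if_pos (by omega : s < i + 1)]
      exact ih (fun c hc => h c (List.mem_cons_of_mem _ hc))
    · simp only [pvSweep, if_neg hs, if_neg (by omega : ¬ s < i + 1)]

-- the first occurrence the sweep accepts from pointer i is the longest match at the
-- least occupied position ≥ i
theorem pv_sweep_accept (vars : List String) (t : List Char)
    (hv : ∀ v ∈ vars, v.toList ≠ []) (cs : List (Int × String)) (i : Int) (v : String)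
    (hp : cs.Pairwise (fun a b => pvLt b a = false))
    (hm : ∀ c ∈ cs, pvMatch vars t c)
    (hmem : (i, v) ∈ cs)
    (hvv : v ∈ vars)
    (hmax : ∀ w ∈ vars, ((t.drop i.toNat).take w.toList.length == w.toList) = true →
      w.toList.length ≤ v.toList.length) :
    pvSweep t cs i =
      (if decide (i + v.toList.length < (t.length : Int))
          && (t.getD (i + v.toList.length).toNat ' ' == '\'') then
        ("~" ++ v) :: pvSweep t cs (i + v.toList.length + 1)
      else v :: pvSweep t cs (i + v.toList.length)) := by
  have hv1 : 1 ≤ v.toList.length := List.length_pos_iff.mpr (hv v hvv)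
  induction cs with
  | nil => simp at hmem
  | cons c rest ih =>
    obtain ⟨s, w⟩ := c
    rw [List.pairwise_cons] at hp
    by_cases hs : s < i
    · have hmem' : (i, v) ∈ rest := by
        rcases List.mem_cons.mp hmem with h | h
        · exact absurd (congrArg Prod.fst h).symm (by simp; omega)
        · exact h
      have ihh := ih hp.2 (fun c hc => hm c (List.mem_cons_of_mem _ hc)) hmem'
      conv_lhs => rw [pvSweep, if_pos hs]
      rw [ihh]
      by_cases hc : (decide (i + v.toList.length < (t.length : Int))
          && (t.getD (i + v.toList.length).toNat ' ' == '\'')) = true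
      · rw [if_pos hc, if_pos hc]
        conv_rhs => rw [pvSweep, if_pos (by omega : s < i + v.toList.length + 1)]
      · rw [if_neg hc, if_neg hc]
        conv_rhs => rw [pvSweep, if_pos (by omega : s < i + v.toList.length)]
    · -- the head is the accepted occurrence, and it must be (i, v)
      have hcv : (s, w) = (i, v) := by
        rcases List.mem_cons.mp hmem with h | h
        · exact h.symm
        · have hR := hp.1 (i, v) h
          simp [pvLt] at hR
          have hsi : s = i := by omega
          have hmw : pvMatch vars t (s, w) := hm (s, w) List.mem_cons_self
          have hbw : ((t.drop s.toNat).take w.toList.length == w.toList) = true := by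
            rw [← pv_match_eq]; exact hmw.2.2
          have hbv2 : ((t.drop s.toNat).take v.toList.length == v.toList) = true := by
            rw [← pv_match_eq, hsi]; exact (hm (i, v) (List.mem_cons_of_mem _ h)).2.2
          have h1 : w.toList.length ≤ v.toList.length := hmax w hmw.1 (by rw [← hsi]; exact hbw)
          have h2 : v.toList.length ≤ w.toList.length := by
            simp only [String.length_toList]; omega
          simp only [Prod.mk.injEq]
          exact ⟨hsi, pv_match_unique t s.toNat w v hbw hbv2 (by omega)⟩
      rw [hcv]
      conv_lhs => rw [pvSweep]
      rw [if_neg (show ¬ i < i by omega)]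
      dsimp only
      by_cases hc : (decide (i + v.toList.length < (t.length : Int))
          && (t.getD (i + v.toList.length).toNat ' ' == '\'')) = true
      · rw [if_pos hc, if_pos hc]
        conv_rhs => rw [pvSweep, if_pos (show i < i + v.toList.length + 1 by omega)]
      · rw [if_neg hc, if_neg hc]
        conv_rhs => rw [pvSweep, if_pos (show i < i + v.toList.length by omega)]

-- MAIN: A's per-position greedy scan from i equals B's sweep over a sorted complete
-- occurrence list with pointer i
theorem pv_main (vars : List String) (t : List Char)
    (hv : ∀ v ∈ vars, v.toList ≠ []) (cs : List (Int × String))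
    (hp : cs.Pairwise (fun a b => pvLt b a = false))
    (hm : ∀ c ∈ cs, pvMatch vars t c)
    (hcomp : ∀ (s : Int) (v : String), pvMatch vars t (s, v) → (s, v) ∈ cs) :
    ∀ (fuel i : Nat) (lits : List String), t.length - i ≤ fuel →
      pvAScan (PySem.List.sorted vars (fun v => v.toList.length) true) t fuel i lits
        = lits.reverse ++ pvSweep t cs (i : Int) := by
  intro fuel
  induction fuel with
  | zero =>
    intro i lits hfuel
    have hin : t.length ≤ i := by omega
    rw [pvAScan, pv_sweep_nil t cs (i : Int) (fun c hc => by
      obtain ⟨s, v⟩ := c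
      have := pv_match_bounds vars t hv s v (hm _ hc)
      simp only
      omega)]
    simp
  | succ f ih =>
    intro i lits hfuel
    by_cases hin : i < t.length
    · rw [pvAScan]
      simp only [if_pos hin]
      cases hf : (PySem.List.sorted vars (fun v => v.toList.length) true).find?
          (fun v => (t.drop i).take v.toList.length == v.toList) with
      | none =>
        -- no variable matches at i
        have hnone : ∀ w ∈ vars, ((t.drop i).take w.toList.length == w.toList) = false := by
          intro w hw
          simpa using List.find?_eq_none.mp hf w ((PySem.List.mem_sorted _ _ _ _).mpr hw)
        rw [ih (i + 1) lits (by omega)]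
        rw [pv_sweep_succ t cs (i : Int) (fun c hc => by
          obtain ⟨s, w⟩ := c
          intro hsi
          have hmw := hm _ hc
          have : ((t.drop ((s : Int)).toNat).take w.toList.length == w.toList) = true := by
            rw [← pv_match_eq]; exact hmw.2.2
          rw [show ((s : Int)).toNat = i by simp only at hsi; omega] at this
          rw [hnone w hmw.1] at this
          exact Bool.false_ne_true this)]
        norm_cast
      | some v =>
        dsimp only
        -- v is the longest variable matching at i
        have hvv : v ∈ vars := (PySem.List.mem_sorted _ _ _ _).mp (List.mem_of_find?_eq_some hf)
        have hbv : ((t.drop i).take v.toList.length == v.toList) = true := by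
          simpa using List.find?_some hf
        have hmax : ∀ w ∈ vars, ((t.drop i).take w.toList.length == w.toList) = true →
            w.toList.length ≤ v.toList.length := by
          intro w hw hbw
          exact pv_find_max t i _ (PySem.List.sorted_pairwise_rev vars (fun v => v.toList.length))
            v hf w ((PySem.List.mem_sorted _ _ _ _).mpr hw) hbw
        have hmi : pvMatch vars t ((i : Int), v) := by
          refine ⟨hvv, by positivity, ?_⟩
          rw [Int.toNat_natCast, pv_match_eq]; exact hbv
        have hacc := pv_sweep_accept vars t hv cs (i : Int) v hp hm
          (hcomp (i : Int) v hmi) hvv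
          (by rw [Int.toNat_natCast]; exact hmax)
        rw [hacc]
        have hv1 : 1 ≤ v.toList.length := List.length_pos_iff.mpr (hv v hvv)
        have hcond : (decide ((i : Int) + v.toList.length < (t.length : Int))
              && (t.getD ((i : Int) + v.toList.length).toNat ' ' == '\''))
            = (decide (i + v.toList.length < t.length) && (t.getD (i + v.toList.length) ' ' == '\'')) := by
          have h1 : ((i : Int) + v.toList.length).toNat = i + v.toList.length := by omega
          have h2 : (decide ((i : Int) + v.toList.length < (t.length : Int)))
              = decide (i + v.toList.length < t.length) := by
            simp only [decide_eq_decide]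
            omega
          rw [h1, h2]
        rw [hcond]
        by_cases hc : (decide (i + v.toList.length < t.length)
            && (t.getD (i + v.toList.length) ' ' == '\'')) = true
        · rw [if_pos hc, if_pos hc]
          rw [ih (i + v.toList.length + 1) (("~" ++ v) :: lits) (by omega)]
          simp only [List.reverse_cons, List.append_assoc, List.singleton_append]
          norm_cast
        · rw [if_neg hc, if_neg hc]
          rw [ih (i + v.toList.length) (v :: lits) (by omega)]
          simp only [List.reverse_cons, List.append_assoc, List.singleton_append]
          norm_cast
    · rw [pvAScan]
      simp only [if_neg hin]
      rw [pv_sweep_nil t cs (i : Int) (fun c hc => by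
        obtain ⟨s, w⟩ := c
        have := pv_match_bounds vars t hv s w (hm _ hc)
        simp only
        omega)]
      simp

theorem pv_join_eq_render (lits : List String) : pvAJoin lits = pvRender lits := by
  match lits with
  | [] => rfl
  | [l] => simp [pvAJoin, pvRender]
  | a :: b :: r => simp [pvAJoin, pvRender]

theorem pv_fold_map {α β : Type} (f : α → β) :
    ∀ (ts : List α) (acc : List β),
      ts.foldl (fun acc t => acc ++ [f t]) acc = acc ++ ts.map f := by
  intro ts
  induction ts with
  | nil => intro acc; simp
  | cons t ts ih => intro acc; simp [ih]

-- per-term equality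
theorem pv_term_eq (vars : List String) (hv : ∀ v ∈ vars, v.toList ≠ []) (term : String) :
    pvAJoin (pvAScan (PySem.List.sorted vars (fun v => v.toList.length) true)
        term.toList term.toList.length 0 [])
      = pvTranslate vars term := by
  unfold pvTranslate
  rw [pv_join_eq_render]
  congr 1
  have hperm := PySem.List.sorted2_perm (pvCands vars term.toList) (fun c => c.1)
    (fun c => -(c.2.toList.length : Int)) false
  have h := pv_main vars term.toList hv _ (pv_sorted2_pairwise (pvCands vars term.toList))
    (fun c hc => (pv_mem_cands vars term.toList hv c).mp (hperm.mem_iff.mp hc))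
    (fun s v hm => hperm.mem_iff.mpr ((pv_mem_cands vars term.toList hv (s, v)).mpr hm))
    term.toList.length 0 [] (by omega)
  simpa using h

-- ===== VERDICT (by name: the statement is the Claim_ definition above) =====
theorem sop_to_verilog_spec : Claim_equal_sop_to_verilog := by
  intro expression num_vars var_names _ hpre
  unfold Spec_sop_to_verilog sop_to_verilog sop_to_verilog_alt
  split
  · rfl
  · split
    · rfl
    · rw [pv_fold_map]
      simp only [List.nil_append]
      congr 1
      apply List.map_congr_left
      intro term _
      exact pv_term_eq _ (fun v hvv hnil => hpre (by rwa [show v = "" from String.toList_inj.mp (by simp [hnil])] at hvv)) term
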